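-- pv_equiv track=rewrite | github.com/christianrosdahl/aoc2024 | day22.py | get_sequence_to_price_map
-- ===== SOURCE A (Python) =====
-- import math
--
-- def generate_secret_number(initial_number, num_generations=1):
--     prune_number = 16777216
--     num = initial_number
--     for _ in range(num_generations):
--         num = ((num * 64) ^ num) % prune_number
--         num = (math.floor(num / 32) ^ num) % prune_number
--         num = ((num * 2048) ^ num) % prune_number
--     return num
--
-- def get_sequence_to_price_map(initial_number, num_generations=2000):
--     secret_numbers = generate_secret_numbers(initial_number, num_generations)
--     prices = [num % 10 for num in secret_numbers]
--     price_diffs = [prices[i + 1] - prices[i] for i in range(len(prices) - 1)]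
--     sequence_to_price = [
--         (tuple(price_diffs[i : i + 4]), prices[i + 4])
--         for i in range(len(price_diffs) - 4)
--     ]
--     sequence_to_price_map = {}
--     for sequence, price in sequence_to_price:
--         if not sequence in sequence_to_price_map:
--             sequence_to_price_map[sequence] = price
--     return sequence_to_price_map
--
-- def generate_secret_numbers(initial_number, num_generations):
--     result = [initial_number]
--     num = initial_number
--     for _ in range(num_generations):
--         num = generate_secret_number(num)
--         result.append(num)
--     return result
-- ===== SOURCE B (Python) =====
-- def get_sequence_to_price_map(initial_number, num_generations=2000):
--     # Single streaming pass: no intermediate lists of secrets/prices/diffs.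
--     # Windows are recorded for steps 4 .. num_generations-1 only, matching the
--     # original's window count (it iterates over range(len(price_diffs) - 4)).
--     result = {}
--     num = initial_number
--     prev = num % 10
--     d1 = d2 = d3 = 0  # the last three price diffs; meaningful once k >= 4
--     for k in range(1, num_generations):
--         num = ((num * 64) ^ num) % 16777216
--         num = ((num // 32) ^ num) % 16777216
--         num = ((num * 2048) ^ num) % 16777216
--         price = num % 10
--         d = price - prev
--         prev = price
--         if k >= 4:
--             result.setdefault((d1, d2, d3, d), price)
--         d1, d2, d3 = d2, d3, d
--     return result
-- ===== Notes on version B (the rewrite author's own statement) =====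
-- stated objective: faster
-- what changed: Replaces the four-pass list pipeline (secrets list, prices list, diffs list, windows list, then a dict loop) by one streaming loop that keeps only the current secret, previous price and the last three diffs, inserting each window with dict.setdefault as it appears.
import Mathlib
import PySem

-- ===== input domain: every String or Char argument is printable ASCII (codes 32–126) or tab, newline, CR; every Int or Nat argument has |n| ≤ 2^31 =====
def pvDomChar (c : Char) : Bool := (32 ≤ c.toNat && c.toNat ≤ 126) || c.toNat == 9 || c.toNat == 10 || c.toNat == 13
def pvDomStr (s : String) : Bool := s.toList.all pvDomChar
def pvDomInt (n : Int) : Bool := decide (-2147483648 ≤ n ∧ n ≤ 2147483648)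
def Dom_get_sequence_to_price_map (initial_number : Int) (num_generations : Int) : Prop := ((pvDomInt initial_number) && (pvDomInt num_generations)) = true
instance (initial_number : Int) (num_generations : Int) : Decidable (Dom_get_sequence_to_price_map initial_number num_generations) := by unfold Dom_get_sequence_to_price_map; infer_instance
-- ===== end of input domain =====

-- B replaces A's four-pass list pipeline by one streaming fold keeping only the
-- current secret, previous price and last three diffs (measured constant-factor faster).


-- ===== PORT A =====
def generate_secret_number (initial_number : Int) (num_generations : Int) : Int :=
  (PySem.List.pyRange 0 num_generations 1).foldl (fun num _ =>
    let n1 := PySem.Int.mod (PySem.Int.bxor (num * 64) num) 16777216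
    -- math.floor(num / 32): exact as integer floor division here, since at this
    -- point num ∈ [0, 2^24) (result of the preceding `% 16777216`), so the float
    -- division is exact and its floor is num // 32
    let n2 := PySem.Int.mod (PySem.Int.bxor (PySem.Int.floordiv n1 32) n1) 16777216
    PySem.Int.mod (PySem.Int.bxor (n2 * 2048) n2) 16777216) initial_number

def generate_secret_numbers (initial_number : Int) (num_generations : Int) : List Int :=
  let res := (PySem.List.pyRange 0 num_generations 1).foldl
    (fun acc _ =>
      let num := generate_secret_number acc.2 1
      (acc.1 ++ [num], num))
    ([initial_number], initial_number)
  res.1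

def get_sequence_to_price_map (initial_number : Int) (num_generations : Int) : List (Int × Int × Int × Int × Int) :=
  let secret_numbers := generate_secret_numbers initial_number num_generations
  let prices := secret_numbers.map (fun num => PySem.Int.mod num 10)
  let price_diffs := (PySem.List.pyRange 0 ((prices.length : Int) - 1) 1).map
    (fun i => PySem.List.pyGetD prices (i + 1) 0 - PySem.List.pyGetD prices i 0)
  -- tuple(price_diffs[i : i + 4]) written as the four (in-range) indexings
  let sequence_to_price := (PySem.List.pyRange 0 ((price_diffs.length : Int) - 4) 1).map
    (fun i => ((PySem.List.pyGetD price_diffs i 0, PySem.List.pyGetD price_diffs (i + 1) 0,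
                PySem.List.pyGetD price_diffs (i + 2) 0, PySem.List.pyGetD price_diffs (i + 3) 0),
               PySem.List.pyGetD prices (i + 4) 0))
  let m := sequence_to_price.foldl
    (fun d p => if d.contains p.1 then d else d.insert p.1 p.2)
    (PySem.Dict.empty : PySem.Dict (Int × Int × Int × Int) Int)
  -- dict with a 4-tuple key, flattened per the type convention
  m.items.map (fun p => (p.1.1, p.1.2.1, p.1.2.2.1, p.1.2.2.2, p.2))

-- ===== PORT B =====
def get_sequence_to_price_map_alt (initial_number : Int) (num_generations : Int) : List (Int × Int × Int × Int × Int) :=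
  let st := (PySem.List.pyRange 1 num_generations 1).foldl
    (fun st k =>
      let num := st.1
      let prev := st.2.1
      let d1 := st.2.2.1
      let d2 := st.2.2.2.1
      let d3 := st.2.2.2.2.1
      let result := st.2.2.2.2.2
      let num := PySem.Int.mod (PySem.Int.bxor (num * 64) num) 16777216
      let num := PySem.Int.mod (PySem.Int.bxor (PySem.Int.floordiv num 32) num) 16777216
      let num := PySem.Int.mod (PySem.Int.bxor (num * 2048) num) 16777216
      let price := PySem.Int.mod num 10
      let d := price - prev
      let result := if 4 ≤ k then result.setdefault (d1, d2, d3, d) price else result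
      (num, price, d2, d3, d, result))
    ((initial_number, PySem.Int.mod initial_number 10, 0, 0, 0,
      (PySem.Dict.empty : PySem.Dict (Int × Int × Int × Int) Int)) :
      Int × Int × Int × Int × Int × PySem.Dict (Int × Int × Int × Int) Int)
  st.2.2.2.2.2.items.map (fun p => (p.1.1, p.1.2.1, p.1.2.2.1, p.1.2.2.2, p.2))

-- ===== PRECONDITION & SPEC =====
def Spec_get_sequence_to_price_map (initial_number : Int) (num_generations : Int) (out : List (Int × Int × Int × Int × Int)) : Prop := out = get_sequence_to_price_map_alt initial_number num_generations
instance (initial_number : Int) (num_generations : Int) (out : List (Int × Int × Int × Int × Int)) : Decidable (Spec_get_sequence_to_price_map initial_number num_generations out) := by unfold Spec_get_sequence_to_price_map; infer_instance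

-- ===== CLAIM (what is proved, stated in full; the proofs are below) =====
def Claim_equal_get_sequence_to_price_map : Prop := ∀ (initial_number : Int) (num_generations : Int), Dom_get_sequence_to_price_map initial_number num_generations → Spec_get_sequence_to_price_map initial_number num_generations (get_sequence_to_price_map initial_number num_generations)

-- ===== LEMMAS AND PROOFS =====

-- the one-generation secret transformation
def pvStep (num : Int) : Int :=
  let n1 := PySem.Int.mod (PySem.Int.bxor (num * 64) num) 16777216
  let n2 := PySem.Int.mod (PySem.Int.bxor (PySem.Int.floordiv n1 32) n1) 16777216
  PySem.Int.mod (PySem.Int.bxor (n2 * 2048) n2) 16777216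

-- k-th secret number
def pvS (x : Int) : Nat → Int
  | 0 => x
  | k + 1 => pvStep (pvS x k)

def pvPrice (x : Int) (k : Nat) : Int := PySem.Int.mod (pvS x k) 10

def pvDiff (x : Int) (k : Nat) : Int := pvPrice x (k + 1) - pvPrice x k

def pvKey (x : Int) (i : Nat) : Int × Int × Int × Int :=
  (pvDiff x i, pvDiff x (i + 1), pvDiff x (i + 2), pvDiff x (i + 3))

-- the common reference dict: first n windows, first occurrence wins
def pvRefD (x : Int) (n : Nat) : PySem.Dict (Int × Int × Int × Int) Int :=
  (List.range n).foldl
    (fun d i => if d.contains (pvKey x i) then d else d.insert (pvKey x i) (pvPrice x (i + 4)))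
    PySem.Dict.empty

theorem pv_gen_one (n : Int) : generate_secret_number n 1 = pvStep n := by
  have h : PySem.List.pyRange 0 1 1 = [0] := by
    rw [PySem.List.pyRange_one_cons (by norm_num), PySem.List.pyRange_one_eq_nil (by norm_num)]
  simp [generate_secret_number, h, pvStep]

theorem pv_gens_fold (x : Int) (t : Nat) :
    ((List.range t).foldl
      (fun (acc : List Int × Int) _ =>
        let num := generate_secret_number acc.2 1
        (acc.1 ++ [num], num)) ([x], x))
    = ((List.range (t + 1)).map (pvS x), pvS x t) := by
  induction t with
  | zero => simp [pvS]
  | succ t ih =>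
      rw [List.range_succ, List.foldl_append, ih, List.range_succ, List.range_succ]
      simp [pv_gen_one, pvS, List.range_succ]

theorem pv_gens (x g : Int) :
    generate_secret_numbers x g = (List.range (g.toNat + 1)).map (pvS x) := by
  unfold generate_secret_numbers
  rw [PySem.List.pyRange_one]
  rw [List.foldl_map]
  have := pv_gens_fold x ((g - 0).toNat)
  simp only [Int.sub_zero] at *
  simp [this]

theorem pv_prices (x g : Int) :
    (generate_secret_numbers x g).map (fun num => PySem.Int.mod num 10)
      = (List.range (g.toNat + 1)).map (pvPrice x) := by
  rw [pv_gens, List.map_map]; rfl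

theorem pvA_diffs (x : Int) (n : Nat) :
    (PySem.List.pyRange 0 ((((List.range (n + 1)).map (pvPrice x)).length : Int) - 1) 1).map
      (fun i => PySem.List.pyGetD ((List.range (n + 1)).map (pvPrice x)) (i + 1) 0
              - PySem.List.pyGetD ((List.range (n + 1)).map (pvPrice x)) i 0)
    = (List.range n).map (pvDiff x) := by
  have hl : ((((List.range (n + 1)).map (pvPrice x)).length : Int) - 1) = (n : Int) := by simp
  rw [hl, PySem.List.pyRange_zero_natCast, List.map_map]
  apply List.map_congr_left
  intro k hk
  rw [List.mem_range] at hk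
  simp only [Function.comp_apply]
  have e1 : ((k : Int) + 1) = ((k + 1 : Nat) : Int) := by push_cast; ring
  rw [e1, PySem.List.pyGetD_natCast, PySem.List.pyGetD_natCast,
      PySem.List.getD_map_range _ _ _ _ (by omega), PySem.List.getD_map_range _ _ _ _ (by omega)]
  rfl

theorem pvA_windows (x : Int) (n : Nat) :
    ((List.range (n - 4)).map (fun k : Nat => (k : Int))).map
      (fun i => ((PySem.List.pyGetD ((List.range n).map (pvDiff x)) i 0,
                  PySem.List.pyGetD ((List.range n).map (pvDiff x)) (i + 1) 0,
                  PySem.List.pyGetD ((List.range n).map (pvDiff x)) (i + 2) 0,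
                  PySem.List.pyGetD ((List.range n).map (pvDiff x)) (i + 3) 0),
                 PySem.List.pyGetD ((List.range (n + 1)).map (pvPrice x)) (i + 4) 0))
    = (List.range (n - 4)).map (fun i => (pvKey x i, pvPrice x (i + 4))) := by
  rw [List.map_map]
  apply List.map_congr_left
  intro k hk
  rw [List.mem_range] at hk
  simp only [Function.comp_apply]
  have e1 : ((k : Int) + 1) = ((k + 1 : Nat) : Int) := by push_cast; ring
  have e2 : ((k : Int) + 2) = ((k + 2 : Nat) : Int) := by push_cast; ring
  have e3 : ((k : Int) + 3) = ((k + 3 : Nat) : Int) := by push_cast; ring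
  have e4 : ((k : Int) + 4) = ((k + 4 : Nat) : Int) := by push_cast; ring
  rw [e1, e2, e3, e4, PySem.List.pyGetD_natCast, PySem.List.pyGetD_natCast,
      PySem.List.pyGetD_natCast, PySem.List.pyGetD_natCast, PySem.List.pyGetD_natCast,
      PySem.List.getD_map_range _ _ _ _ (by omega), PySem.List.getD_map_range _ _ _ _ (by omega),
      PySem.List.getD_map_range _ _ _ _ (by omega), PySem.List.getD_map_range _ _ _ _ (by omega),
      PySem.List.getD_map_range _ _ _ _ (by omega)]
  rfl

-- A's dict equals the reference dict
theorem pvA_dict (x g : Int) :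
    get_sequence_to_price_map x g
      = (pvRefD x (g.toNat - 4)).items.map (fun p => (p.1.1, p.1.2.1, p.1.2.2.1, p.1.2.2.2, p.2)) := by
  simp only [get_sequence_to_price_map]
  rw [pv_prices x g, pvA_diffs x g.toNat]
  have hl2 : ((((List.range g.toNat).map (pvDiff x)).length : Int) - 4) = (g.toNat : Int) - 4 := by
    simp
  rw [hl2, PySem.List.pyRange_one]
  have ht : (((g.toNat : Int) - 4 - 0)).toNat = g.toNat - 4 := by omega
  rw [ht]
  have hc : (fun k : Nat => (0 : Int) + (k : Int)) = (fun k : Nat => (k : Int)) := by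
    funext k; ring
  rw [hc, pvA_windows x g.toNat, List.foldl_map]
  rfl

-- B's fold invariant
theorem pvB_fold (x : Int) (t : Nat) :
    (((List.range t).map (fun j : Nat => (1 : Int) + (j : Int))).foldl
      (fun (st : Int × Int × Int × Int × Int × PySem.Dict (Int × Int × Int × Int) Int) k =>
        let num := st.1
        let prev := st.2.1
        let d1 := st.2.2.1
        let d2 := st.2.2.2.1
        let d3 := st.2.2.2.2.1
        let result := st.2.2.2.2.2
        let num := PySem.Int.mod (PySem.Int.bxor (num * 64) num) 16777216
        let num := PySem.Int.mod (PySem.Int.bxor (PySem.Int.floordiv num 32) num) 16777216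
        let num := PySem.Int.mod (PySem.Int.bxor (num * 2048) num) 16777216
        let price := PySem.Int.mod num 10
        let d := price - prev
        let result := if 4 ≤ k then result.setdefault (d1, d2, d3, d) price else result
        (num, price, d2, d3, d, result))
      (x, PySem.Int.mod x 10, 0, 0, 0, PySem.Dict.empty))
    = (pvS x t, pvPrice x t,
       (if 3 ≤ t then pvDiff x (t - 3) else 0),
       (if 2 ≤ t then pvDiff x (t - 2) else 0),
       (if 1 ≤ t then pvDiff x (t - 1) else 0),
       pvRefD x (t - 3)) := by
  induction t with
  | zero => simp [pvRefD, pvS, pvPrice]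
  | succ t ih =>
      rw [List.range_succ, List.map_append, List.foldl_append, ih,
          List.map_cons, List.map_nil, List.foldl_cons, List.foldl_nil]
      have hsd : ∀ (dd : PySem.Dict (Int × Int × Int × Int) Int) key v,
          dd.setdefault key v = if dd.contains key then dd else dd.insert key v := by
        intro dd key v
        by_cases hc : dd.contains key
        · rw [PySem.Dict.setdefault_of_contains _ _ hc, if_pos hc]
        · rw [PySem.Dict.setdefault_of_not_contains _ _ (by simpa using hc), if_neg hc]
      show (pvS x (t + 1), pvPrice x (t + 1),
            (if 2 ≤ t then pvDiff x (t - 2) else 0),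
            (if 1 ≤ t then pvDiff x (t - 1) else 0),
            pvDiff x t,
            if (4 : Int) ≤ 1 + (t : Int) then
              (pvRefD x (t - 3)).setdefault
                ((if 3 ≤ t then pvDiff x (t - 3) else 0),
                 (if 2 ≤ t then pvDiff x (t - 2) else 0),
                 (if 1 ≤ t then pvDiff x (t - 1) else 0), pvDiff x t)
                (pvPrice x (t + 1))
            else pvRefD x (t - 3))
          = _
      by_cases h3 : 3 ≤ t
      · rw [if_pos (show (4 : Int) ≤ 1 + (t : Int) by omega), if_pos h3,
            if_pos (show 2 ≤ t by omega), if_pos (show 1 ≤ t by omega), hsd]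
        have hk : pvKey x (t - 3)
            = (pvDiff x (t - 3), pvDiff x (t - 2), pvDiff x (t - 1), pvDiff x t) := by
          unfold pvKey
          rw [show t - 3 + 1 = t - 2 from by omega, show t - 3 + 2 = t - 1 from by omega,
              show t - 3 + 3 = t from by omega]
        have hv : pvPrice x (t + 1) = pvPrice x (t - 3 + 4) := by
          rw [show t - 3 + 4 = t + 1 from by omega]
        have hdict : pvRefD x (t + 1 - 3)
            = (if (pvRefD x (t - 3)).contains (pvKey x (t - 3)) then pvRefD x (t - 3)
               else (pvRefD x (t - 3)).insert (pvKey x (t - 3)) (pvPrice x (t - 3 + 4))) := by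
          rw [show t + 1 - 3 = (t - 3) + 1 from by omega]
          unfold pvRefD
          rw [List.range_succ, List.foldl_append, List.foldl_cons, List.foldl_nil]
        have b1 : (if 3 ≤ t + 1 then pvDiff x (t + 1 - 3) else 0) = pvDiff x (t - 2) := by
          rw [if_pos (show 3 ≤ t + 1 by omega), show t + 1 - 3 = t - 2 from by omega]
        have b2 : (if 2 ≤ t + 1 then pvDiff x (t + 1 - 2) else 0) = pvDiff x (t - 1) := by
          rw [if_pos (show 2 ≤ t + 1 by omega), show t + 1 - 2 = t - 1 from by omega]
        have b3 : (if 1 ≤ t + 1 then pvDiff x (t + 1 - 1) else 0) = pvDiff x t := by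
          rw [if_pos (show 1 ≤ t + 1 by omega), show t + 1 - 1 = t from by omega]
        rw [← hk, hv, hdict, b1, b2, b3]
      · rw [if_neg (show ¬ (4 : Int) ≤ 1 + (t : Int) by omega)]
        have b1 : (if 3 ≤ t + 1 then pvDiff x (t + 1 - 3) else 0)
            = (if 2 ≤ t then pvDiff x (t - 2) else 0) := by
          by_cases h2 : 2 ≤ t
          · rw [if_pos (show 3 ≤ t + 1 by omega), if_pos h2, show t + 1 - 3 = t - 2 from by omega]
          · rw [if_neg (show ¬ 3 ≤ t + 1 by omega), if_neg h2]
        have b2 : (if 2 ≤ t + 1 then pvDiff x (t + 1 - 2) else 0)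
            = (if 1 ≤ t then pvDiff x (t - 1) else 0) := by
          by_cases h1 : 1 ≤ t
          · rw [if_pos (show 2 ≤ t + 1 by omega), if_pos h1, show t + 1 - 2 = t - 1 from by omega]
          · rw [if_neg (show ¬ 2 ≤ t + 1 by omega), if_neg h1]
        have b3 : (if 1 ≤ t + 1 then pvDiff x (t + 1 - 1) else 0) = pvDiff x t := by
          rw [if_pos (show 1 ≤ t + 1 by omega), show t + 1 - 1 = t from by omega]
        rw [b1, b2, b3, show t + 1 - 3 = t - 3 from by omega]

theorem pvB_dict (x g : Int) :
    get_sequence_to_price_map_alt x g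
      = (pvRefD x (g.toNat - 4)).items.map (fun p => (p.1.1, p.1.2.1, p.1.2.2.1, p.1.2.2.2, p.2)) := by
  unfold get_sequence_to_price_map_alt
  rw [PySem.List.pyRange_one]
  rw [pvB_fold x ((g - 1).toNat)]
  have hm : (g - 1).toNat - 3 = g.toNat - 4 := by omega
  rw [hm]

-- ===== VERDICT (by name: the statement is the Claim_ definition above) =====
theorem get_sequence_to_price_map_spec : Claim_equal_get_sequence_to_price_map := by
  intro x g _
  unfold Spec_get_sequence_to_price_map
  rw [pvA_dict, pvB_dict]
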